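-- pv_equiv track=rewrite | github.com/ethxnwzng/HalaraChatbot-InfringementDetector | lark/home/crawler/halara_crawler_job.py | _merge_products
-- ===== SOURCE A (Python) =====
-- from typing import Dict, Any, Set, List, Tuple
--
-- def _merge_products(existing_data: Dict, new_products: List[Dict]) -> Dict:
--     """
--     Merge new products with existing data organized by category.
--
--     This method combines newly crawled and analyzed products with
--     existing product data, organizing everything by category for
--     consistent data structure and easy access.
--
--     params:
--         existing_data: Dictionary of existing products organized by category
--         new_products: List of newly crawled and analyzed products
--
--     returns:
--         Dict: Merged product data organized by category
--             Structure: {category: [product1, product2, ...]}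
--     """
--     merged_data = existing_data.copy()
--
--     for product in new_products:
--         category = product.get('category', 'unknown')
--         if category not in merged_data:
--             merged_data[category] = []
--         merged_data[category].append(product)
--
--     return merged_data
-- ===== SOURCE B (Python) =====
-- def _merge_products(existing_data, new_products):
--     # Rebuild the result declaratively: each existing category's list plus the
--     # matching new products (filtered per category), then the fresh categories
--     # in first-appearance order, each with its filtered products.
--     def cat(p):
--         return p.get('category', 'unknown')
--     merged = {c: items + [p for p in new_products if cat(p) == c]
--               for c, items in existing_data.items()}
--     for p in new_products:
--         c = cat(p)
--         if c not in merged: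
--             merged[c] = [q for q in new_products if cat(q) == c]
--     return merged
-- ===== Notes on version B (the rewrite author's own statement) =====
-- stated objective: alternative
-- what changed: B rebuilds the result declaratively: one comprehension gives each existing category its old items plus the per-category filter of new_products, then fresh categories are appended in first-appearance order with their filtered products - no dict copy, no per-product membership-test-and-append loop as in A.
import Mathlib
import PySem

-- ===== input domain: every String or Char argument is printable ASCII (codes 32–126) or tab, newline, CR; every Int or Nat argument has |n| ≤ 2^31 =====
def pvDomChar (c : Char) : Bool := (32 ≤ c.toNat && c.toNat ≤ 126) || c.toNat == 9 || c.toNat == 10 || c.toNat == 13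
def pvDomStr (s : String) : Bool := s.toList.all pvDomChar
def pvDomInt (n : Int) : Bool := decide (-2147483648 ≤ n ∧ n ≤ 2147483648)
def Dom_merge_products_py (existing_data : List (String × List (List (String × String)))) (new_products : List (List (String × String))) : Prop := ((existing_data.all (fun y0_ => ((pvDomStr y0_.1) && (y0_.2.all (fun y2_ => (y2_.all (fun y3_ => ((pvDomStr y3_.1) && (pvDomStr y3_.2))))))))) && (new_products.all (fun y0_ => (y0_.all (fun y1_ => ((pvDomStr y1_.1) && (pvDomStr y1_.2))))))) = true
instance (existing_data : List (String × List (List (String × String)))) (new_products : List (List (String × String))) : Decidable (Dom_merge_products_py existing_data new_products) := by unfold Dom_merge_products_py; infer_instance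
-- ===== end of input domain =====

-- B rebuilds the merged dict declaratively with per-category filters over plain lists instead of
-- A's copy-then-append loop; equivalence is about the RETURN value only (A mutates the inner
-- lists shared with existing_data, B does not).

-- product.get('category', 'unknown') — first-match lookup in the product's association list
def pvCatOf (p : List (String × String)) : String :=
  (PySem.Dict.mk p).getD "category" "unknown"

-- ===== PORT A =====
def merge_products_py (existing_data : List (String × List (List (String × String)))) (new_products : List (List (String × String))) : List (String × List (List (String × String))) :=
  (new_products.foldl
    (fun merged product =>
      let category := pvCatOf product
      -- if category not in merged_data: merged_data[category] = []
      let merged := if merged.contains category then merged else merged.insert category []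
      -- merged_data[category].append(product)  (category is present, so modify with default [] is exact)
      merged.modify category [] (fun v => v ++ [product]))
    (PySem.Dict.mk existing_data)).items

-- ===== PORT B =====
def merge_products_py_alt (existing_data : List (String × List (List (String × String)))) (new_products : List (List (String × String))) : List (String × List (List (String × String))) :=
  -- merged = {c: items + [p for p in new_products if cat(p) == c] for c, items in existing_data.items()}
  let merged := existing_data.map
    (fun ci => (ci.1, ci.2 ++ new_products.filter (fun p => pvCatOf p == ci.1)))
  -- for p in new_products: if cat(p) not in merged: merged[cat(p)] = [q for q in new_products if cat(q) == cat(p)]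
  new_products.foldl
    (fun out p =>
      let c := pvCatOf p
      if out.any (fun q => q.1 == c) then out
      else out ++ [(c, new_products.filter (fun q => pvCatOf q == c))])
    merged

-- ===== PRECONDITION & SPEC =====
-- Pre_ excludes association lists with duplicate keys (in existing_data or in a product):
-- those do not encode any Python dict, so A is never run on them.
def Pre_merge_products_py (existing_data : List (String × List (List (String × String)))) (new_products : List (List (String × String))) : Prop :=
  (existing_data.map Prod.fst).Nodup ∧ ∀ p ∈ new_products, (p.map Prod.fst).Nodup
instance (existing_data : List (String × List (List (String × String)))) (new_products : List (List (String × String))) : Decidable (Pre_merge_products_py existing_data new_products) := by unfold Pre_merge_products_py; infer_instance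

def pvWitness_merge_products_py : (List (String × List (List (String × String)))) × (List (List (String × String))) :=
  ([("shirts", [[("name", "a")]])],
   [[("category", "shirts"), ("name", "b")], [("name", "c")], [("category", "pants"), ("name", "d")]])

def Spec_merge_products_py (existing_data : List (String × List (List (String × String)))) (new_products : List (List (String × String))) (out : List (String × List (List (String × String)))) : Prop := out = merge_products_py_alt existing_data new_products
instance (existing_data : List (String × List (List (String × String)))) (new_products : List (List (String × String))) (out : List (String × List (List (String × String)))) : Decidable (Spec_merge_products_py existing_data new_products out) := by unfold Spec_merge_products_py; infer_instance

-- ===== CLAIM (what is proved, stated in full; the proofs are below) =====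
def Claim_equal_merge_products_py : Prop := ∀ (existing_data : List (String × List (List (String × String)))) (new_products : List (List (String × String))), Dom_merge_products_py existing_data new_products → Pre_merge_products_py existing_data new_products → Spec_merge_products_py existing_data new_products (merge_products_py existing_data new_products)

-- ===== LEMMAS AND PROOFS =====

-- abbreviations for the loop bodies and B's pieces (proof-local)
def pvStepA (d : PySem.Dict String (List (List (String × String)))) (p : List (String × String)) : PySem.Dict String (List (List (String × String))) :=
  let c := pvCatOf p
  let d := if d.contains c then d else d.insert c []
  d.modify c [] (fun v => v ++ [p])

def pvGenB (n : List (List (String × String))) (c : String) : String × List (List (String × String)) :=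
  (c, n.filter (fun q => pvCatOf q == c))

def pvMergedB (e : List (String × List (List (String × String)))) (n : List (List (String × String))) : List (String × List (List (String × String))) :=
  e.map (fun ci => (ci.1, ci.2 ++ n.filter (fun p => pvCatOf p == ci.1)))

def pvStepOutB (n : List (List (String × String))) (out : List (String × List (List (String × String)))) (p : List (String × String)) : List (String × List (List (String × String))) :=
  if out.any (fun q => q.1 == pvCatOf p) then out
  else out ++ [(pvCatOf p, n.filter (fun q => pvCatOf q == pvCatOf p))]

def pvStepCB (K0 acc : List String) (c : String) : List String :=
  if K0.contains c || acc.contains c then acc else acc ++ [c]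

-- A's loop: value at any key
lemma pvStepA_getD (d : PySem.Dict String (List (List (String × String)))) (p : List (String × String)) (k : String) :
    (pvStepA d p).getD k [] = d.getD k []
      ++ (if pvCatOf p == k then [p] else []) := by
  unfold pvStepA
  by_cases hc : d.contains (pvCatOf p) = true
  · simp only [hc, if_true, PySem.Dict.getD_modify]
    by_cases hk : k = pvCatOf p
    · subst hk; simp
    · simp [hk, Ne.symm hk, beq_iff_eq]
  · simp only [Bool.not_eq_true] at hc
    simp only [hc, Bool.false_eq_true, if_false, PySem.Dict.getD_modify, PySem.Dict.getD_insert]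
    by_cases hk : k = pvCatOf p
    · subst hk; simp [PySem.Dict.getD_of_not_contains d _ hc]
    · simp [hk, Ne.symm hk, beq_iff_eq]

lemma pvFoldA_getD (l : List (List (String × String))) (d : PySem.Dict String (List (List (String × String)))) (k : String) :
    (l.foldl pvStepA d).getD k [] = d.getD k [] ++ l.filter (fun p => pvCatOf p == k) := by
  induction l generalizing d with
  | nil => simp
  | cons p l ih =>
      simp only [List.foldl_cons, ih, pvStepA_getD, List.filter_cons]
      by_cases h : (pvCatOf p == k) = true <;> simp [h, List.append_assoc]

-- A's loop: keys
lemma pvStepA_keys (d : PySem.Dict String (List (List (String × String)))) (p : List (String × String)) :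
    (pvStepA d p).keys = PySem.Set.add d.keys (pvCatOf p) := by
  unfold pvStepA
  by_cases hc : d.contains (pvCatOf p) = true
  · simp only [hc, if_true, PySem.Dict.keys_modify,
      PySem.Dict.keys_insert_of_contains d _ hc]
    rw [PySem.Set.add_of_mem ((PySem.Dict.contains_iff_mem_keys d _).mp hc)]
  · simp only [Bool.not_eq_true] at hc
    simp only [hc, Bool.false_eq_true, if_false, PySem.Dict.keys_modify]
    have h1 : (d.insert (pvCatOf p) []).contains (pvCatOf p) = true :=
      PySem.Dict.contains_insert_self d _ _
    rw [PySem.Dict.keys_insert_of_contains _ _ h1,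
        PySem.Dict.keys_insert_of_not_contains d _ hc,
        PySem.Set.add_of_not_mem (fun h => by
          rw [(PySem.Dict.contains_iff_mem_keys d _).mpr h] at hc; cases hc)]

lemma pvFoldA_keys (l : List (List (String × String))) (d : PySem.Dict String (List (List (String × String)))) :
    (l.foldl pvStepA d).keys = PySem.Set.update d.keys (l.map pvCatOf) := by
  rw [PySem.Set.update_map_eq_foldl_add]
  induction l generalizing d with
  | nil => simp
  | cons p l ih => simp only [List.foldl_cons, ih, pvStepA_keys]

-- any over first components = contains on the key list
lemma pvAnyFst {α : Type} (xs : List (String × α)) (c : String) :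
    xs.any (fun q => q.1 == c) = (xs.map Prod.fst).contains c := by
  induction xs with
  | nil => rfl
  | cons a xs ih =>
      simp only [List.any_cons, List.map_cons, List.contains_cons, ih]
      rw [show (a.1 == c) = (c == a.1) by
        rcases eq_or_ne a.1 c with h | h
        · subst h; rfl
        · simp [h, Ne.symm h]]

lemma pvContainsAppend (l m : List String) (c : String) :
    (l ++ m).contains c = (l.contains c || m.contains c) := by
  induction l with
  | nil => simp
  | cons a l _ => simp [Bool.or_assoc]

-- Set.update splits as "old keys ++ the genuinely fresh ones, deduped in order"
lemma pvUpdSplit (K0 : List String) (cats : List String) : ∀ acc : List String,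
    PySem.Set.update (K0 ++ acc) cats = K0 ++ cats.foldl (pvStepCB K0) acc := by
  induction cats with
  | nil => intro acc; rfl
  | cons c cats ih =>
      intro acc
      rw [PySem.Set.update_cons, List.foldl_cons]
      have hcontains : PySem.Set.contains (K0 ++ acc) c = (K0.contains c || acc.contains c) := by
        simp [PySem.Set.contains]
      by_cases h : (K0.contains c || acc.contains c) = true
      · have hadd : PySem.Set.add (K0 ++ acc) c = K0 ++ acc := by
          unfold PySem.Set.add; rw [if_pos (by rw [hcontains]; exact h)]
        have hstep : pvStepCB K0 acc c = acc := by unfold pvStepCB; rw [if_pos h]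
        rw [hadd, hstep, ih]
      · have hadd : PySem.Set.add (K0 ++ acc) c = K0 ++ (acc ++ [c]) := by
          unfold PySem.Set.add
          rw [if_neg (by rw [hcontains]; exact h), List.append_assoc]
        have hstep : pvStepCB K0 acc c = acc ++ [c] := by unfold pvStepCB; rw [if_neg h]
        rw [hadd, hstep, ih]

-- every category produced by the fresh-category fold is outside K0
lemma pvFreshNotMem (K0 : List String) (cats : List String) : ∀ acc : List String,
    (∀ x ∈ acc, K0.contains x = false) →
    ∀ x ∈ cats.foldl (pvStepCB K0) acc, K0.contains x = false := by
  induction cats with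
  | nil => intro acc h; exact h
  | cons c cats ih =>
      intro acc h
      rw [List.foldl_cons]
      by_cases hc : (K0.contains c || acc.contains c) = true
      · rw [show pvStepCB K0 acc c = acc by unfold pvStepCB; rw [if_pos hc]]
        exact ih acc h
      · rw [show pvStepCB K0 acc c = acc ++ [c] by unfold pvStepCB; rw [if_neg hc]]
        refine ih _ ?_
        intro x hx
        rcases List.mem_append.mp hx with hx | hx
        · exact h x hx
        · simp only [List.mem_singleton] at hx
          subst hx
          simp only [Bool.or_eq_true, not_or, Bool.not_eq_true] at hc
          exact hc.1

-- B's second loop, characterized: it appends exactly the fresh categories' groups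
lemma pvFoldOutB (e : List (String × List (List (String × String)))) (n : List (List (String × String))) (l : List (List (String × String))) : ∀ acc : List String,
    l.foldl (pvStepOutB n) (pvMergedB e n ++ acc.map (pvGenB n))
      = pvMergedB e n ++ (l.foldl (fun a p => pvStepCB (e.map Prod.fst) a (pvCatOf p)) acc).map (pvGenB n) := by
  induction l with
  | nil => intro acc; rfl
  | cons p l ih =>
      intro acc
      rw [List.foldl_cons, List.foldl_cons]
      have hkeys : (pvMergedB e n ++ acc.map (pvGenB n)).map Prod.fst = e.map Prod.fst ++ acc := by
        simp [pvMergedB, pvGenB, Function.comp_def]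
      have hany : (pvMergedB e n ++ acc.map (pvGenB n)).any (fun q => q.1 == pvCatOf p)
          = ((e.map Prod.fst).contains (pvCatOf p) || acc.contains (pvCatOf p)) := by
        rw [pvAnyFst, hkeys, pvContainsAppend]
      by_cases h : ((e.map Prod.fst).contains (pvCatOf p) || acc.contains (pvCatOf p)) = true
      · rw [show pvStepOutB n (pvMergedB e n ++ acc.map (pvGenB n)) p = pvMergedB e n ++ acc.map (pvGenB n) by
          unfold pvStepOutB; rw [if_pos (by rw [hany]; exact h)],
          show pvStepCB (e.map Prod.fst) acc (pvCatOf p) = acc by unfold pvStepCB; rw [if_pos h], ih]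
      · rw [show pvStepOutB n (pvMergedB e n ++ acc.map (pvGenB n)) p
              = pvMergedB e n ++ (acc ++ [pvCatOf p]).map (pvGenB n) by
          unfold pvStepOutB
          rw [if_neg (by rw [hany]; exact h)]
          simp [pvGenB, List.append_assoc],
          show pvStepCB (e.map Prod.fst) acc (pvCatOf p) = acc ++ [pvCatOf p] by
            unfold pvStepCB; rw [if_neg h], ih]

-- ===== VERDICT (by name: the statement is the Claim_ definition above) =====
theorem merge_products_py_spec : Claim_equal_merge_products_py := by
  intro e n _ hpre
  unfold Spec_merge_products_py merge_products_py merge_products_py_alt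
  have hek : (PySem.Dict.mk e).keys.Nodup := hpre.1
  have hkeysE : (PySem.Dict.mk e).keys = e.map Prod.fst := rfl
  -- the fresh categories, deduped in first-appearance order
  set D := (n.map pvCatOf).foldl (pvStepCB (e.map Prod.fst)) [] with hD
  -- A's dict: keys and values
  have hAnodup : (n.foldl pvStepA (PySem.Dict.mk e)).keys.Nodup := by
    rw [pvFoldA_keys]; exact PySem.Set.nodup_update _ _ hek
  have hAkeys : (n.foldl pvStepA (PySem.Dict.mk e)).keys = e.map Prod.fst ++ D := by
    rw [pvFoldA_keys, hkeysE]
    have := pvUpdSplit (e.map Prod.fst) (n.map pvCatOf) []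
    simpa using this
  -- B's result
  have hB : n.foldl (pvStepOutB n) (pvMergedB e n) = pvMergedB e n ++ D.map (pvGenB n) := by
    have := pvFoldOutB e n n []
    simp only [List.map_nil, List.append_nil] at this
    rw [this, hD, List.foldl_map]
  -- assemble
  show (n.foldl pvStepA (PySem.Dict.mk e)).items = n.foldl (pvStepOutB n) (pvMergedB e n)
  rw [hB, PySem.Dict.items_eq_map_keys _ hAnodup [], hAkeys, List.map_append]
  congr 1
  · -- existing part: map over e's keys reproduces e's entries with the filtered suffix
    rw [List.map_map]
    unfold pvMergedB
    refine List.map_congr_left ?_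
    intro ci hci
    show (ci.1, (n.foldl pvStepA (PySem.Dict.mk e)).getD ci.1 []) = _
    rw [pvFoldA_getD]
    have hmem : (ci.1, ci.2) ∈ (PySem.Dict.mk e).items := by simpa using hci
    rw [PySem.Dict.getD_of_mem_items _ hmem hek]
  · -- fresh part: each fresh category is absent from e, so its value is just the filter
    refine List.map_congr_left ?_
    intro c hc
    have hnotin : (e.map Prod.fst).contains c = false :=
      pvFreshNotMem (e.map Prod.fst) (n.map pvCatOf) [] (by intro x hx; cases hx) c (hD ▸ hc)
    have hdc : (PySem.Dict.mk e).contains c = false := by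
      rw [Bool.eq_false_iff]
      intro habs
      have hm := (PySem.Dict.contains_iff_mem_keys _ _).mp habs
      rw [hkeysE] at hm
      have := List.contains_iff_mem.mpr hm
      rw [hnotin] at this
      cases this
    rw [pvFoldA_getD, PySem.Dict.getD_of_not_contains _ _ hdc]
    rfl
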